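-- pv_equiv track=rewrite | github.com/singhbijendra2312-dev/ai-dropshipping | app/scoring/engine.py | _feature_score
-- ===== SOURCE A (Python) =====
-- def _feature_score(features: list[str]) -> int:
--     n = len([f for f in features if f.strip()])
--     if n == 0:
--         return 0
--     if n <= 2:
--         return 15
--     if n <= 4:
--         return 25
--     return 35
-- ===== SOURCE B (Python) =====
-- def _feature_score(features: list[str]) -> int:
--     # Streaming scorer: add the score increment earned by each non-blank feature
--     # (+15 for the 1st, +10 for the 3rd and the 5th) and stop early at the 5th,
--     # since the score saturates there. No total count and no bucket cascade.
--     score = 0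
--     n = 0
--     for f in features:
--         if f.strip():
--             n += 1
--             if n == 1:
--                 score += 15
--             elif n == 3 or n == 5:
--                 score += 10
--             if n == 5:
--                 break
--     return score
-- ===== Notes on version B (the rewrite author's own statement) =====
-- stated objective: alternative
-- what changed: Replaces count-then-bucket (len of a filtered list fed into an if/elif cascade) with a single streaming pass that accumulates score increments (+15 at the 1st, +10 at the 3rd and 5th non-blank feature) and breaks early once the score saturates at the 5th.
import Mathlib
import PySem

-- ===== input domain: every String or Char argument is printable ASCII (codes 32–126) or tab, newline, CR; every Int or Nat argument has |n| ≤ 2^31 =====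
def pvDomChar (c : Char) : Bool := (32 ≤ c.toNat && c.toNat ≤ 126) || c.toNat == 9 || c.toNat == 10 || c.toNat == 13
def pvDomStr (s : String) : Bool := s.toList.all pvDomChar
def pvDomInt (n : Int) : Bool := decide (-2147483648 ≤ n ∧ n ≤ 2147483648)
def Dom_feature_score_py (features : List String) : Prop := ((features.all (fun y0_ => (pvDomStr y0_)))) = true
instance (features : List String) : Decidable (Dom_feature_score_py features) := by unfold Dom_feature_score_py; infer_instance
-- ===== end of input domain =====

-- B streams score increments (+15 at the 1st, +10 at the 3rd and 5th non-blank feature)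
-- with an early break at the 5th, instead of counting then bucketing with an if-cascade.


-- ===== PORT A =====
def feature_score_py (features : List String) : Int :=
  let n : Int := (features.filter (fun f => PySem.Str.strip f ≠ "")).length
  if n == 0 then 0
  else if n ≤ 2 then 15
  else if n ≤ 4 then 25
  else 35

-- ===== PORT B =====
-- the for-loop with `break` at n == 5, as a structural recursion over the list
def featureScoreGo : List String → Int → Int → Int
  | [], _, score => score
  | f :: fs, n, score =>
      if PySem.Str.strip f ≠ "" then
        let n' := n + 1
        let score' := score + (if n' == 1 then 15 else if n' == 3 || n' == 5 then 10 else 0)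
        if n' == 5 then score' else featureScoreGo fs n' score'
      else featureScoreGo fs n score

def feature_score_py_alt (features : List String) : Int :=
  featureScoreGo features 0 0

-- ===== PRECONDITION & SPEC =====
def Spec_feature_score_py (features : List String) (out : Int) : Prop := out = feature_score_py_alt features
instance (features : List String) (out : Int) : Decidable (Spec_feature_score_py features out) := by unfold Spec_feature_score_py; infer_instance

-- ===== CLAIM (what is proved, stated in full; the proofs are below) =====
def Claim_equal_feature_score_py : Prop := ∀ (features : List String), Dom_feature_score_py features → Spec_feature_score_py features (feature_score_py features)

-- ===== LEMMAS AND PROOFS =====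
-- the bucket A computes, as a function of the non-blank count
def pvBucket (n : Int) : Int :=
  if n == 0 then 0 else if n ≤ 2 then 15 else if n ≤ 4 then 25 else 35

-- loop invariant: starting from a count n < 5 with the score pvBucket n earned so far,
-- the loop ends with the bucket of the total non-blank count
theorem featureScoreGo_inv (fs : List String) : ∀ (n : Int), 0 ≤ n → n < 5 →
    featureScoreGo fs n (pvBucket n)
      = pvBucket (n + (fs.filter (fun f => PySem.Str.strip f ≠ "")).length) := by
  induction fs with
  | nil => intro n _ _; simp [featureScoreGo]
  | cons f fs ih =>
    intro n hn0 hn5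
    by_cases hf : PySem.Str.strip f = ""
    · rw [List.filter_cons_of_neg (by simpa using hf)]
      simp only [featureScoreGo, hf, ne_eq, not_true_eq_false, if_false]
      exact ih n hn0 hn5
    · rw [List.filter_cons_of_pos (by simpa using hf)]
      simp only [featureScoreGo, if_pos hf]
      by_cases h5 : n + 1 = 5
      · have hn4 : n = 4 := by omega
        subst hn4
        norm_num [pvBucket]
        split_ifs <;> omega
      · have hstep : pvBucket n + (if (n + 1) == 1 then 15 else if (n + 1) == 3 || (n + 1) == 5 then (10:Int) else 0)
            = pvBucket (n + 1) := by
          have h0 : 0 ≤ n ∧ n < 5 := ⟨hn0, hn5⟩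
          interval_cases n <;> decide
        rw [if_neg (by simp [h5]), hstep, ih (n + 1) (by omega) (by omega)]
        simp only [List.length_cons]
        push_cast; ring_nf

-- ===== VERDICT (by name: the statement is the Claim_ definition above) =====
theorem feature_score_py_spec : Claim_equal_feature_score_py := by
  intro features _
  unfold Spec_feature_score_py feature_score_py_alt
  have hA : feature_score_py features
      = pvBucket ((features.filter (fun f => PySem.Str.strip f ≠ "")).length : Int) := rfl
  have h := featureScoreGo_inv features 0 (le_refl 0) (by norm_num)
  simp only [show pvBucket 0 = 0 from rfl, zero_add] at h
  rw [hA, ← h]
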